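-- pv_equiv track=rewrite | github.com/Sanghyeok-Jeon/Algorithms_Python | 백준/Silver/1740. 거듭제곱/거듭제곱.py | solve
-- ===== SOURCE A (Python) =====
-- def solve(n):
--     result = 0
--     power = 1
--
--     while n > 0:
--         if n % 2 == 1:
--             result += power
--         n //= 2
--         power *= 3
--
--     return result
-- ===== SOURCE B (Python) =====
-- def solve(n):
--     if n <= 0:
--         return 0
--     return int(bin(n)[2:], 3)
-- ===== Notes on version B (the rewrite author's own statement) =====
-- stated objective: idiomatic
-- what changed: B reinterprets n's binary digit string in base 3 via int(bin(n)[2:], 3) instead of looping over bits accumulating powers of 3.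
import Mathlib
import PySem

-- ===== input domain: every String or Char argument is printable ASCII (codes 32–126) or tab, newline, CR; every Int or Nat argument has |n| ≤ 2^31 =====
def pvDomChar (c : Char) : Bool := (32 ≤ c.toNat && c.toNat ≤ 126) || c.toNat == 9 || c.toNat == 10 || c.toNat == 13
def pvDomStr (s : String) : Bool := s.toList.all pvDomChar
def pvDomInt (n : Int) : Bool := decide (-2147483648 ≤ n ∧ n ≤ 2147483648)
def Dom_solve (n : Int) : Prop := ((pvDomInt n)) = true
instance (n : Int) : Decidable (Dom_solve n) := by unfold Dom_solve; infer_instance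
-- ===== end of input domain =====

-- B re-reads n's binary digit string as a base-3 numeral (int(bin(n)[2:], 3)) instead of
-- A's bit-by-bit loop accumulating powers of 3; objective: more idiomatic, same cost.

-- ===== PORT A =====
-- the while loop of A, state (n, result, power)
def solveGo (n result power : Int) : Int :=
  if h : n > 0 then
    solveGo (PySem.Int.floordiv n 2)
      (if PySem.Int.mod n 2 = 1 then result + power else result)
      (power * 3)
  else result
termination_by n.toNat
decreasing_by
  rw [PySem.Int.floordiv_eq_ediv_of_pos (by omega : (0:Int) < 2)]
  omega

def solve (n : Int) : Int := solveGo n 0 1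

-- ===== PORT B =====
-- bin(n)[2:] : the binary digits of n, most significant first (n > 0)
def binDigits (n : Int) : List Char :=
  if h : n > 0 then
    binDigits (PySem.Int.floordiv n 2) ++ [if PySem.Int.mod n 2 = 1 then '1' else '0']
  else []
termination_by n.toNat
decreasing_by
  rw [PySem.Int.floordiv_eq_ediv_of_pos (by omega : (0:Int) < 2)]
  omega

-- int(s, 3) for a string of '0'/'1' digits
def parse3 (s : List Char) : Int :=
  s.foldl (fun acc c => acc * 3 + (if c = '1' then 1 else 0)) 0

def solve_alt (n : Int) : Int :=
  if n ≤ 0 then 0 else parse3 (binDigits n)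

-- ===== PRECONDITION & SPEC =====
def Spec_solve (n : Int) (out : Int) : Prop := out = solve_alt n
instance (n : Int) (out : Int) : Decidable (Spec_solve n out) := by unfold Spec_solve; infer_instance

-- ===== CLAIM (what is proved, stated in full; the proofs are below) =====
def Claim_equal_solve : Prop := ∀ (n : Int), Dom_solve n → Spec_solve n (solve n)

-- ===== LEMMAS AND PROOFS =====

-- foldl with a nonzero accumulator: peeling the last digit
theorem parse3Acc_append (s : List Char) (c : Char) (a : Int) :
    List.foldl (fun acc c => acc * 3 + (if c = '1' then 1 else 0)) a (s ++ [c])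
      = (List.foldl (fun acc c => acc * 3 + (if c = '1' then 1 else 0)) a s) * 3
        + (if c = '1' then 1 else 0) := by
  simp [List.foldl_append]

-- the base-3 value of binDigits n satisfies the loop's recurrence
theorem parse3_binDigits (n : Int) (h : n > 0) :
    parse3 (binDigits n)
      = parse3 (binDigits (PySem.Int.floordiv n 2)) * 3
        + (if PySem.Int.mod n 2 = 1 then 1 else 0) := by
  rw [parse3, binDigits, dif_pos h, parse3Acc_append]
  split <;> simp [parse3]

theorem binDigits_nonpos (n : Int) (h : ¬ n > 0) : binDigits n = [] := by
  rw [binDigits, dif_neg h]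

-- loop invariant: solveGo n r p = r + p * (base-3 value of n's binary digits)
theorem solveGo_eq (n : Int) : ∀ r p : Int,
    solveGo n r p = r + p * parse3 (binDigits n) := by
  by_cases h : n > 0
  · have hlt : (PySem.Int.floordiv n 2).toNat < n.toNat := by
      rw [PySem.Int.floordiv_eq_ediv_of_pos (by omega : (0:Int) < 2)]
      omega
    intro r p
    rw [solveGo, dif_pos h, solveGo_eq (PySem.Int.floordiv n 2), parse3_binDigits n h]
    split <;> ring
  · intro r p
    rw [solveGo, dif_neg h, binDigits_nonpos n h]
    simp [parse3]
termination_by n.toNat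

-- ===== VERDICT (by name: the statement is the Claim_ definition above) =====
theorem solve_spec : Claim_equal_solve := by
  intro n _
  show solve n = solve_alt n
  rw [solve, solveGo_eq, solve_alt]
  by_cases h : n ≤ 0
  · rw [if_pos h, binDigits_nonpos n (by omega)]; simp [parse3]
  · rw [if_neg h]; ring
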